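-- pv_equiv track=rewrite | github.com/CalebBurton/advent-of-code | 2023/day_11/11_code.py | get_expansions
-- ===== SOURCE A (Python) =====
-- def get_expansions(p1, p2, items_with_galaxies, row_or_col):
--     start = min(p1[row_or_col], p2[row_or_col])
--     end = max(p1[row_or_col], p2[row_or_col]) + 1
--     num_expansions = 0
--     for i in range(start, end):
--         if i not in items_with_galaxies:
--             num_expansions += 1
--     return num_expansions
-- ===== SOURCE B (Python) =====
-- def get_expansions(p1, p2, items_with_galaxies, row_or_col):
--     lo = min(p1[row_or_col], p2[row_or_col])
--     hi = max(p1[row_or_col], p2[row_or_col])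
--     in_range = {g for g in items_with_galaxies if lo <= g <= hi}
--     return (hi - lo + 1) - len(in_range)
-- ===== Notes on version B (the rewrite author's own statement) =====
-- stated objective: alternative
-- what changed: Instead of scanning every index of the range and testing set membership, B makes one pass over the galaxy set collecting those inside the range and returns range length minus that count (cost moves from O(end-start) to O(|items_with_galaxies|); not measured faster on the generated inputs).
import Mathlib
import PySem

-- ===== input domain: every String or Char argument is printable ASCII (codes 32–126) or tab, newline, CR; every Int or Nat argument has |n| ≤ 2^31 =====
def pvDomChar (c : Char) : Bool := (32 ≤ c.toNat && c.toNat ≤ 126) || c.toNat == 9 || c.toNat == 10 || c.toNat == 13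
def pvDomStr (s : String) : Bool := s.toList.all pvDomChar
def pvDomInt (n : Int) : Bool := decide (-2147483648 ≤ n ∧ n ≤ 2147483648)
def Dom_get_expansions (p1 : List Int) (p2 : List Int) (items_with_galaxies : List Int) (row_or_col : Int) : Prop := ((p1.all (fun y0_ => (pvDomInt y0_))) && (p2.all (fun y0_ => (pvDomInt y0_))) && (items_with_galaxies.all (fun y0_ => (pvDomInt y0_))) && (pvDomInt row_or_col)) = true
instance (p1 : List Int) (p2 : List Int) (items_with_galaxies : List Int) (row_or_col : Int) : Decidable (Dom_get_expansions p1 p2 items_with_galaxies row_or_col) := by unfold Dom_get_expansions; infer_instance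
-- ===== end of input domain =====

-- B replaces A's scan over every index of [start, end) by one pass over the galaxy set
-- (range length minus number of galaxies lying in the range): a different traversal of the
-- same data (alternative; no speed claim).

-- ===== PORT A =====
def get_expansions (p1 : List Int) (p2 : List Int) (items_with_galaxies : List Int) (row_or_col : Int) : Int :=
  match PySem.List.pyGet? p1 row_or_col, PySem.List.pyGet? p2 row_or_col with
  | some v1, some v2 =>
    let start := min v1 v2
    let stop := max v1 v2 + 1
    (PySem.List.pyRange start stop 1).foldl
      (fun num_expansions i =>
        if items_with_galaxies.contains i then num_expansions else num_expansions + 1) 0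
  | _, _ => 0  -- IndexError in Python; excluded by Pre_

-- ===== PORT B =====
def get_expansions_alt (p1 : List Int) (p2 : List Int) (items_with_galaxies : List Int) (row_or_col : Int) : Int :=
  ((PySem.List.pyGet? p1 row_or_col).bind fun v1 =>
    (PySem.List.pyGet? p2 row_or_col).map fun v2 =>
      let lo := min v1 v2
      let hi := max v1 v2
      let in_range : PySem.Set Int :=
        PySem.Set.ofList (items_with_galaxies.filter (fun g => decide (lo ≤ g) && decide (g ≤ hi)))
      hi - lo + 1 - PySem.Set.len in_range).getD 0  -- none = IndexError in Python; excluded by Pre_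

-- ===== PRECONDITION & SPEC =====
-- Pre_ excludes exactly the inputs where Python's p1[row_or_col] / p2[row_or_col] raises IndexError.
def Pre_get_expansions (p1 : List Int) (p2 : List Int) (items_with_galaxies : List Int) (row_or_col : Int) : Prop :=
  PySem.Raise.InRange p1.length row_or_col ∧ PySem.Raise.InRange p2.length row_or_col
instance (p1 : List Int) (p2 : List Int) (items_with_galaxies : List Int) (row_or_col : Int) : Decidable (Pre_get_expansions p1 p2 items_with_galaxies row_or_col) := by unfold Pre_get_expansions; infer_instance
def pvWitness_get_expansions : List Int × List Int × List Int × Int := ([1, 5], [4, 2], [2, 7], 0)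

def Spec_get_expansions (p1 : List Int) (p2 : List Int) (items_with_galaxies : List Int) (row_or_col : Int) (out : Int) : Prop := out = get_expansions_alt p1 p2 items_with_galaxies row_or_col
instance (p1 : List Int) (p2 : List Int) (items_with_galaxies : List Int) (row_or_col : Int) (out : Int) : Decidable (Spec_get_expansions p1 p2 items_with_galaxies row_or_col out) := by unfold Spec_get_expansions; infer_instance

-- ===== CLAIM (what is proved, stated in full; the proofs are below) =====
def Claim_equal_get_expansions : Prop := ∀ (p1 : List Int) (p2 : List Int) (items_with_galaxies : List Int) (row_or_col : Int), Dom_get_expansions p1 p2 items_with_galaxies row_or_col → Pre_get_expansions p1 p2 items_with_galaxies row_or_col → Spec_get_expansions p1 p2 items_with_galaxies row_or_col (get_expansions p1 p2 items_with_galaxies row_or_col)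

-- ===== LEMMAS AND PROOFS =====

-- A's loop counts the range elements that are not galaxies.
lemma foldl_count_notmem (items : List Int) (l : List Int) (n : Int) :
    l.foldl (fun num_expansions i =>
      if items.contains i then num_expansions else num_expansions + 1) n
      = n + (l.countP (fun i => !items.contains i) : Int) := by
  induction l generalizing n with
  | nil => simp
  | cons x xs ih =>
    simp only [List.foldl_cons, List.countP_cons, ih]
    by_cases h : x ∈ items <;> simp [h] <;> omega

-- Galaxies inside the range, counted from the range side and from the set side, agree.
lemma filter_range_length (items : List Int) (lo hi : Int) :
    ((PySem.List.pyRange lo (hi + 1) 1).filter (fun i => items.contains i)).length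
      = (PySem.Set.ofList (items.filter (fun g => decide (lo ≤ g) && decide (g ≤ hi)))).length := by
  apply List.Perm.length_eq
  apply (List.perm_ext_iff_of_nodup ((PySem.List.nodup_pyRange_one lo (hi+1)).filter _)
    (PySem.Set.nodup_ofList _)).mpr
  intro x
  simp only [List.mem_filter, PySem.Set.mem_ofList, PySem.List.mem_pyRange_one,
    Bool.and_eq_true, decide_eq_true_eq]
  constructor
  · rintro ⟨⟨ha, hb⟩, hc⟩; exact ⟨by simpa using hc, ha, by omega⟩
  · rintro ⟨hc, ha, hb⟩; exact ⟨⟨ha, by omega⟩, by simpa using hc⟩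

theorem get_expansions_spec : Claim_equal_get_expansions := by
  unfold Claim_equal_get_expansions
  intro p1 p2 items r _ hpre
  obtain ⟨h1, h2⟩ := hpre
  obtain ⟨v1, hv1⟩ := Option.ne_none_iff_exists'.mp
    (fun h => (PySem.List.pyGet?_eq_none_iff p1 r).mp h h1)
  obtain ⟨v2, hv2⟩ := Option.ne_none_iff_exists'.mp
    (fun h => (PySem.List.pyGet?_eq_none_iff p2 r).mp h h2)
  unfold Spec_get_expansions get_expansions get_expansions_alt
  rw [hv1, hv2]
  simp only [Option.bind_some, Option.map_some, Option.getD_some]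
  set lo := min v1 v2 with hlo
  set hi := max v1 v2 with hhi
  have hlohi : lo ≤ hi := min_le_max
  rw [foldl_count_notmem]
  have hsplit := List.length_eq_countP_add_countP (fun i => items.contains i)
    (l := PySem.List.pyRange lo (hi + 1) 1)
  have hflip : ((PySem.List.pyRange lo (hi + 1) 1).countP (fun a => decide ¬items.contains a = true))
      = ((PySem.List.pyRange lo (hi + 1) 1).countP (fun i => !items.contains i)) :=
    List.countP_congr (by intro x _; simp)
  have hlen := PySem.List.length_pyRange_one lo (hi + 1)
  have hcP : ((PySem.List.pyRange lo (hi + 1) 1).countP (fun i => items.contains i))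
      = (PySem.Set.ofList (items.filter (fun g => decide (lo ≤ g) && decide (g ≤ hi)))).length := by
    rw [List.countP_eq_length_filter]
    exact filter_range_length items lo hi
  have htoNat : ((hi + 1 - lo).toNat : Int) = hi + 1 - lo := by omega
  simp only [PySem.Set.len]
  omega

-- ===== VERDICT (by name: the statement is the Claim_ definition above) =====
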